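-- pv_equiv track=rewrite | github.com/bjrtx/aoc2022Python | 2024/day02.py | aux
-- ===== SOURCE A (Python) =====
-- import itertools
--
-- def aux(vals, dampener):
--     diffs = [b - a for a, b in itertools.pairwise(vals)]
--     fails = [i for i, x in enumerate(diffs) if x not in {1, 2, 3}]
--     return (not fails
--             or dampener and len(fails) <= 2 and any(
--                 aux(vals[:j] + vals[j + 1:], dampener=False)
--                 for f in fails
--                 for j in (f, f + 1)
--             ))
-- ===== SOURCE B (Python) =====
-- import itertools
--
-- def aux(vals, dampener):
--     def safe(seq):
--         return all(b - a in (1, 2, 3) for a, b in itertools.pairwise(seq))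
--     def without(i):
--         return itertools.chain(itertools.islice(vals, 0, i),
--                                itertools.islice(vals, i + 1, None))
--     if safe(vals):
--         return True
--     if not dampener:
--         return False
--     return any(safe(without(i)) for i in range(len(vals)))
-- ===== Notes on version B (the rewrite author's own statement) =====
-- stated objective: simpler
-- what changed: Replaces the failure-index pruning (candidate removals adjacent to failing diffs, len(fails)<=2 guard, one-level recursion) with a plain safe() predicate plus exhaustive single-element removal.
import Mathlib
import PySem

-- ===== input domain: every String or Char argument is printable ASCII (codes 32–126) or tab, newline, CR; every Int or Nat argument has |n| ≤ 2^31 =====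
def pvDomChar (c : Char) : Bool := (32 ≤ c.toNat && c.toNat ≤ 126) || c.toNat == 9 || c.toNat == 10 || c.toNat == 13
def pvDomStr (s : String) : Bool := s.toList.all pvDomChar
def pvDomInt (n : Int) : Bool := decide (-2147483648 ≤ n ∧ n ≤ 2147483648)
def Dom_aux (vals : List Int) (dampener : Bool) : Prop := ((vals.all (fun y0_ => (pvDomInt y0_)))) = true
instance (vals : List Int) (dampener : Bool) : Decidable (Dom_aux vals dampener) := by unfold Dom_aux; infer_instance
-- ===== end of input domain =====

-- B replaces A's failure-adjacent candidate pruning with a plain safety predicate plus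
-- exhaustive single-element removal (simpler; not faster).

-- ===== PORT A =====
-- x in {1, 2, 3}
def okDiff (x : Int) : Bool := x == 1 || x == 2 || x == 3

-- fails = [i for i, x in enumerate(diffs) if x not in {1, 2, 3}], diffs the pairwise differences
def failsOf (vals : List Int) : List Int :=
  ((PySem.List.enumerate ((vals.zip vals.tail).map (fun p => p.2 - p.1)) 0).filter
    (fun p => !(okDiff p.2))).map (·.1)

def aux (vals : List Int) (dampener : Bool) : Bool :=
  (failsOf vals).isEmpty ||
    match dampener with
    | false => false
    | true =>
      decide ((failsOf vals).length ≤ 2) &&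
      (failsOf vals).any (fun f => [f, f + 1].any (fun j =>
        aux (PySem.List.slice vals none (some j) ++ PySem.List.slice vals (some (j + 1)) none)
          false))
termination_by (if dampener then 1 else 0)
decreasing_by simp

-- ===== PORT B =====
-- safe(v): every consecutive difference is in (1, 2, 3)
def safeB (v : List Int) : Bool :=
  (v.zip v.tail).all (fun p => p.2 - p.1 == 1 || p.2 - p.1 == 2 || p.2 - p.1 == 3)

def aux_alt (vals : List Int) (dampener : Bool) : Bool :=
  if safeB vals then true
  else if !dampener then false
  else (PySem.List.pyRange 0 vals.length 1).any (fun i =>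
    safeB (PySem.List.slice vals none (some i) ++ PySem.List.slice vals (some (i + 1)) none))

-- ===== PRECONDITION & SPEC =====
def Spec_aux (vals : List Int) (dampener : Bool) (out : Bool) : Prop := out = aux_alt vals dampener
instance (vals : List Int) (dampener : Bool) (out : Bool) : Decidable (Spec_aux vals dampener out) := by unfold Spec_aux; infer_instance

-- ===== CLAIM (what is proved, stated in full; the proofs are below) =====
def Claim_equal_aux : Prop := ∀ (vals : List Int) (dampener : Bool), Dom_aux vals dampener → Spec_aux vals dampener (aux vals dampener)

-- ===== LEMMAS AND PROOFS =====

theorem slice_eraseIdx (vals : List Int) (j : Nat) :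
    PySem.List.slice vals none (some (j : Int)) ++
      PySem.List.slice vals (some ((j : Int) + 1)) none = vals.eraseIdx j := by
  have h : (j : Int) + 1 = ((j + 1 : Nat) : Int) := by push_cast; ring
  rw [PySem.List.slice_to_natCast, h, PySem.List.slice_from_natCast,
    List.eraseIdx_eq_take_drop_succ]

theorem safeB_iff (v : List Int) :
    safeB v = true ↔ ∀ (k : Nat) (h : k + 1 < v.length), okDiff (v[k + 1] - v[k]) = true := by
  rw [safeB, List.all_eq_true]
  constructor
  · intro h k hk
    have hz : k < (v.zip v.tail).length := by
      simp [List.length_zip, List.length_tail]; omega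
    have hm := List.getElem_mem hz
    rw [List.getElem_zip] at hm
    have := h _ hm
    simpa [okDiff, List.getElem_tail] using this
  · intro h p hp
    obtain ⟨i, hi, rfl⟩ := List.mem_iff_getElem.mp hp
    have hi' : i + 1 < v.length := by
      simp [List.length_zip, List.length_tail] at hi; omega
    have := h i hi'
    simpa [okDiff, List.getElem_zip, List.getElem_tail] using this

theorem mem_failsOf (v : List Int) (f : Int) :
    f ∈ failsOf v ↔ ∃ (k : Nat) (h : k + 1 < v.length), f = (k : Int) ∧
      okDiff (v[k + 1] - v[k]'(by omega)) = false := by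
  rw [failsOf]
  simp only [List.mem_map, List.mem_filter, PySem.List.mem_enumerate_iff]
  constructor
  · rintro ⟨p, ⟨⟨k, hk, rfl⟩, hbad⟩, rfl⟩
    simp only [List.length_map, List.length_zip, List.length_tail] at hk
    have hk' : k + 1 < v.length := by omega
    refine ⟨k, hk', by simp, ?_⟩
    simp only [Bool.not_eq_true'] at hbad
    have : ((v.zip v.tail).map (fun p => p.2 - p.1))[k] = v[k+1] - v[k] := by
      simp [List.getElem_map, List.getElem_zip, List.getElem_tail]
    simpa [this] using hbad
  · rintro ⟨k, hk, rfl, hbad⟩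
    have hk' : k < ((v.zip v.tail).map (fun p => p.2 - p.1)).length := by
      simp [List.length_zip, List.length_tail]; omega
    refine ⟨((0 : Int) + k, ((v.zip v.tail).map (fun p => p.2 - p.1))[k]), ⟨⟨k, hk', rfl⟩, ?_⟩, by simp⟩
    have : ((v.zip v.tail).map (fun p => p.2 - p.1))[k] = v[k+1] - v[k] := by
      simp [List.getElem_map, List.getElem_zip, List.getElem_tail]
    simp [this, hbad]

theorem failsOf_isEmpty (v : List Int) : (failsOf v).isEmpty = safeB v := by
  rw [Bool.eq_iff_iff, List.isEmpty_iff, List.eq_nil_iff_forall_not_mem, safeB_iff]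
  constructor
  · intro h k hk
    by_contra hbad
    exact h (k : Int) ((mem_failsOf v _).mpr ⟨k, hk, rfl, by simpa using hbad⟩)
  · intro h f hf
    obtain ⟨k, hk, rfl, hbad⟩ := (mem_failsOf v f).mp hf
    rw [h k hk] at hbad; cases hbad

theorem failsOf_nodup (v : List Int) : (failsOf v).Nodup := by
  rw [failsOf]
  have h1 := PySem.List.pairwise_lt_enumerate ((v.zip v.tail).map (fun p => p.2 - p.1)) 0
  have h2 := h1.filter (fun p => !(okDiff p.2))
  have h3 : ((((PySem.List.enumerate ((v.zip v.tail).map (fun p => p.2 - p.1)) 0).filter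
      (fun p => !(okDiff p.2)))).map (·.1)).Pairwise (· < ·) := List.pairwise_map.mpr h2
  exact h3.imp (fun h => ne_of_lt h)

theorem length_le_two (l : List Int) (a b : Int) (hn : l.Nodup)
    (hs : ∀ x ∈ l, x = a ∨ x = b) : l.length ≤ 2 := by
  have hsub : l.toFinset ⊆ {a, b} := by
    intro x hx
    rcases hs x (List.mem_toFinset.mp hx) with h | h <;> simp [h]
  calc l.length = l.toFinset.card := (List.toFinset_card_of_nodup hn).symm
    _ ≤ ({a, b} : Finset Int).card := Finset.card_le_card hsub
    _ ≤ 2 := Finset.card_insert_le a {b} |>.trans (by simp)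

theorem fails_near (v : List Int) (j : Nat) (hj : j < v.length)
    (hs : safeB (v.eraseIdx j) = true) (f : Int) (hf : f ∈ failsOf v) :
    f = (j : Int) - 1 ∨ f = (j : Int) := by
  obtain ⟨k, hk, rfl, hbad⟩ := (mem_failsOf v f).mp hf
  by_contra hcon
  push Not at hcon
  have hlen : (v.eraseIdx j).length = v.length - 1 := by
    rw [List.length_eraseIdx]; simp [hj]
  have hcases : k + 1 < j ∨ j < k := by omega
  rw [safeB_iff] at hs
  rcases hcases with hlt | hgt
  · have hk1 : k + 1 < (v.eraseIdx j).length := by omega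
    have := hs k hk1
    rw [List.getElem_eraseIdx, List.getElem_eraseIdx] at this
    rw [dif_pos (by omega : k + 1 < j), dif_pos (by omega : k < j)] at this
    rw [this] at hbad; cases hbad
  · have hk1 : (k - 1) + 1 < (v.eraseIdx j).length := by omega
    have := hs (k - 1) hk1
    rw [List.getElem_eraseIdx, List.getElem_eraseIdx] at this
    rw [dif_neg (by omega : ¬ (k - 1 + 1 < j)), dif_neg (by omega : ¬ (k - 1 < j))] at this
    have hrw : k - 1 + 1 + 1 = k + 1 := by omega
    have hrw2 : k - 1 + 1 = k := by omega
    simp only [hrw2] at this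
    rw [this] at hbad; cases hbad

theorem aux_false (v : List Int) : aux v false = safeB v := by
  rw [aux, ← failsOf_isEmpty]; simp

theorem aux_eq_alt (vals : List Int) (dampener : Bool) :
    aux vals dampener = aux_alt vals dampener := by
  cases dampener with
  | false =>
    rw [aux_false]
    by_cases hs : safeB vals <;> simp [aux_alt, hs]
  | true =>
    by_cases hs : safeB vals
    · have he : (failsOf vals).isEmpty = true := by rw [failsOf_isEmpty]; exact hs
      rw [aux]; simp [he, aux_alt, hs]
    · have hs' : safeB vals = false := by simpa using hs
      have he : (failsOf vals).isEmpty = false := by rw [failsOf_isEmpty]; exact hs'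
      rw [aux]
      simp only [he, Bool.false_or, aux_alt, hs', Bool.not_true, aux_false]
      rw [Bool.eq_iff_iff]
      constructor
      · intro h
        obtain ⟨hlen, hany⟩ := (Bool.and_eq_true _ _).mp h
        obtain ⟨f, hf, hinner⟩ := List.any_eq_true.mp hany
        obtain ⟨j, hjmem, hsafe⟩ := List.any_eq_true.mp hinner
        obtain ⟨k, hk, hfk, -⟩ := (mem_failsOf vals f).mp hf
        have hjv : j = f ∨ j = f + 1 := by simpa using hjmem
        refine List.any_eq_true.mpr ⟨j, PySem.List.mem_pyRange_one.mpr ⟨by omega, by omega⟩, hsafe⟩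
      · intro h
        obtain ⟨i, himem, hsafe⟩ := List.any_eq_true.mp h
        obtain ⟨hi0, hin⟩ := PySem.List.mem_pyRange_one.mp himem
        set j : Nat := i.toNat with hjdef
        have hij : i = (j : Int) := (Int.toNat_of_nonneg hi0).symm
        have hjlt : j < vals.length := by omega
        rw [hij, slice_eraseIdx] at hsafe
        have hnear := fun f hf => fails_near vals j hjlt hsafe f hf
        refine (Bool.and_eq_true _ _).mpr ⟨decide_eq_true ?_, ?_⟩
        · exact length_le_two _ _ _ (failsOf_nodup vals) hnear
        · have hne : failsOf vals ≠ [] := by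
            intro hnil; rw [hnil] at he; simp at he
          obtain ⟨f₀, hf₀⟩ := List.exists_mem_of_ne_nil _ hne
          obtain ⟨k, hk, hfk, -⟩ := (mem_failsOf vals f₀).mp hf₀
          refine List.any_eq_true.mpr ⟨f₀, hf₀, List.any_eq_true.mpr ?_⟩
          rcases hnear f₀ hf₀ with hc | hc
          · have h1 : f₀ + 1 = (j : Int) := by omega
            exact ⟨f₀ + 1, by simp, by rw [h1, slice_eraseIdx, hsafe]⟩
          · exact ⟨f₀, by simp, by rw [hc, slice_eraseIdx, hsafe]⟩

-- ===== VERDICT (by name: the statement is the Claim_ definition above) =====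
theorem aux_spec : Claim_equal_aux := by
  intro vals dampener _
  unfold Spec_aux
  exact aux_eq_alt vals dampener
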